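-- pv_equiv track=rewrite | github.com/lkshana/ALTRUISTRY-DECODE-CHALLENGE | question2.py | get_bees_between_flowers
-- ===== SOURCE A (Python) =====
-- def get_bees_between_flowers(s, start_indexes, end_indexes):
--     result = []
--
--     for start, end in zip(start_indexes, end_indexes):
--         segment = s[start - 1:end]
--
--         first_flower_position = segment.find("|")
--         last_flower_position = segment.rfind("|")
--
--         if first_flower_position != -1 and last_flower_position != -1:
--             bees_count = segment[first_flower_position + 1:last_flower_position].count('*')
--             result.append(bees_count)
--         else:
--             result.append(0)
--
--     return result
-- ===== SOURCE B (Python) =====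
-- def get_bees_between_flowers(s, start_indexes, end_indexes):
--     n = len(s)
--     pre = [0]           # pre[i] = number of '*' in s[:i]
--     c = 0
--     for ch in s:
--         if ch == '*':
--             c += 1
--         pre.append(c)
--     prv = [-1]          # prv[i] = index of the last '|' in s[:i], or -1
--     p = -1
--     for i, ch in enumerate(s):
--         if ch == '|':
--             p = i
--         prv.append(p)
--     sb = [0]            # sb[i] = number of '*' in s[i:] before the first '|' there
--     t = 0
--     for ch in reversed(s):
--         if ch == '|':
--             t = 0
--         elif ch == '*':
--             t += 1
--         sb.append(t)
--     sb.reverse()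
--     result = []
--     for start, end in zip(start_indexes, end_indexes):
--         lo, hi, _ = slice(start - 1, end).indices(n)
--         last = prv[hi]
--         result.append(pre[last] - pre[lo] - sb[lo] if last >= lo else 0)
--     return result
-- ===== Notes on version B (the rewrite author's own statement) =====
-- stated objective: alternative
-- what changed: Instead of slicing the string and scanning the segment with find/rfind/count for every query, B precomputes three tables in single passes (prefix star counts, last-pipe-before-index, stars-before-next-pipe) and answers each query by table lookups and subtraction.
import Mathlib
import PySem

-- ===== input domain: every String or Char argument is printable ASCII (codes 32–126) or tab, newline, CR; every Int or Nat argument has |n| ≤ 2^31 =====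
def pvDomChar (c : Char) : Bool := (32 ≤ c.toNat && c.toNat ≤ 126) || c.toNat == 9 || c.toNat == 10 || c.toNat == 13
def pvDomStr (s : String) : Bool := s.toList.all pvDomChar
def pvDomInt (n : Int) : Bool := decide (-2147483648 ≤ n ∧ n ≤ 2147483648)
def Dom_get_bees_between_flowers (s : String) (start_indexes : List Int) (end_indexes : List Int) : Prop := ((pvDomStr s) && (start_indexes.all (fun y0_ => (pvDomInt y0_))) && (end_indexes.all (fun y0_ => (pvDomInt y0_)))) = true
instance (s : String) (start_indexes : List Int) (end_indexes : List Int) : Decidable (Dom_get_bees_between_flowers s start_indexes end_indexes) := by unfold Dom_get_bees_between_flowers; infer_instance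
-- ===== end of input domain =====

-- B replaces A's per-query segment scans by three precomputed tables (star prefix counts,
-- last-pipe-before, stars-before-next-pipe) and answers each query by table lookups.

-- ===== PORT A =====
def get_bees_between_flowers (s : String) (start_indexes : List Int) (end_indexes : List Int) : List Int :=
  (start_indexes.zip end_indexes).foldl (fun result se =>
    let segment := PySem.Str.slice s (some (se.1 - 1)) (some se.2)
    let first_flower_position := PySem.Str.find segment "|"
    let last_flower_position := PySem.Str.rfind segment "|"
    if first_flower_position ≠ -1 ∧ last_flower_position ≠ -1 then
      result ++ [((PySem.Str.count (PySem.Str.slice segment (some (first_flower_position + 1)) (some last_flower_position)) "*" : Nat) : Int)]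
    else
      result ++ [0]) []

-- ===== PORT B =====
def get_bees_between_flowers_alt (s : String) (start_indexes : List Int) (end_indexes : List Int) : List Int :=
  let cs := s.toList
  let n := cs.length
  let prec := cs.foldl (fun (st : List Int × Int) ch =>
      let c := if ch = '*' then st.2 + 1 else st.2
      (st.1 ++ [c], c)) ([0], 0)
  let pre := prec.1
  let prvp := (PySem.List.enumerate cs).foldl (fun (st : List Int × Int) ic =>
      let p := if ic.2 = '|' then ic.1 else st.2
      (st.1 ++ [p], p)) ([-1], -1)
  let prv := prvp.1
  let sbt := cs.reverse.foldl (fun (st : List Int × Int) ch =>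
      let t := if ch = '|' then 0 else if ch = '*' then st.2 + 1 else st.2
      (st.1 ++ [t], t)) ([0], 0)
  let sb := sbt.1.reverse
  (start_indexes.zip end_indexes).map (fun se =>
    -- lo, hi, _ = slice(start - 1, end).indices(n): PySem.List.clampIdx is exactly that clamping
    let lo := PySem.List.clampIdx n (se.1 - 1)
    let hi := PySem.List.clampIdx n se.2
    let last := PySem.List.pyGetD prv (hi : Int) 0
    if last ≥ (lo : Int) then
      PySem.List.pyGetD pre last 0 - PySem.List.pyGetD pre (lo : Int) 0 - PySem.List.pyGetD sb (lo : Int) 0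
    else 0)

-- ===== PRECONDITION & SPEC =====
def Spec_get_bees_between_flowers (s : String) (start_indexes : List Int) (end_indexes : List Int) (out : List Int) : Prop := out = get_bees_between_flowers_alt s start_indexes end_indexes
instance (s : String) (start_indexes : List Int) (end_indexes : List Int) (out : List Int) : Decidable (Spec_get_bees_between_flowers s start_indexes end_indexes out) := by unfold Spec_get_bees_between_flowers; infer_instance

-- ===== CLAIM (what is proved, stated in full; the proofs are below) =====
def Claim_equal_get_bees_between_flowers : Prop := ∀ (s : String) (start_indexes : List Int) (end_indexes : List Int), Dom_get_bees_between_flowers s start_indexes end_indexes → Spec_get_bees_between_flowers s start_indexes end_indexes (get_bees_between_flowers s start_indexes end_indexes)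

-- ===== LEMMAS AND PROOFS =====

-- number of '*' among the first k characters
def pvStars (cs : List Char) (k : Nat) : Int := ((cs.take k).count '*' : Int)

-- the value of B's `p` accumulator after scanning the first k characters (st = index offset)
def pvLastPAux (cs : List Char) (st p : Int) : Nat → Int
  | 0 => p
  | k+1 => if cs[k]? = some '|' then st + (k : Int) else pvLastPAux cs st p k

-- index of the last '|' among the first k characters, -1 if none
def pvLastP (cs : List Char) (k : Nat) : Int := pvLastPAux cs 0 (-1) k

-- the value of B's `t` accumulator after scanning the first k characters of ds
def pvSbAux (ds : List Char) (t : Int) : Nat → Int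
  | 0 => t
  | k+1 => if ds[k]? = some '|' then 0 else if ds[k]? = some '*' then pvSbAux ds t k + 1 else pvSbAux ds t k

-- number of '*' before the first '|'
def pvSbs (cs : List Char) : Int := ((cs.takeWhile (fun c => c != '|')).count '*' : Int)

-- A's per-query computation, as a function
def pvQA (s : String) (se : Int × Int) : Int :=
  let segment := PySem.Str.slice s (some (se.1 - 1)) (some se.2)
  let f := PySem.Str.find segment "|"
  let r := PySem.Str.rfind segment "|"
  if f ≠ -1 ∧ r ≠ -1 then
    ((PySem.Str.count (PySem.Str.slice segment (some (f + 1)) (some r)) "*" : Nat) : Int)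
  else 0

lemma pvLastP_succ (cs : List Char) (k : Nat) :
    pvLastP cs (k+1) = if cs[k]? = some '|' then (k : Int) else pvLastP cs k := by
  simp [pvLastP, pvLastPAux]

lemma pvLastP_lt (cs : List Char) (k : Nat) : pvLastP cs k < (k : Int) := by
  induction k with
  | zero => simp [pvLastP, pvLastPAux]
  | succ k ih =>
    rw [pvLastP_succ]
    split
    · push_cast; omega
    · omega

lemma pvLastP_pipe (cs : List Char) (k : Nat) (h : 0 ≤ pvLastP cs k) :
    cs[(pvLastP cs k).toNat]? = some '|' := by
  induction k with
  | zero => simp [pvLastP, pvLastPAux] at h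
  | succ k ih =>
    rw [pvLastP_succ] at h ⊢
    split
    · rename_i hp
      simpa using hp
    · rename_i hp
      rw [if_neg hp] at h
      exact ih h

lemma pvLastP_max (cs : List Char) (k : Nat) (j : Nat) (hj : j < k)
    (hp : cs[j]? = some '|') : (j : Int) ≤ pvLastP cs k := by
  induction k with
  | zero => omega
  | succ k ih =>
    rw [pvLastP_succ]
    by_cases hjk : j = k
    · subst hjk; simp [hp]
    · have := ih (by omega)
      split
      · push_cast; omega
      · exact this

lemma pvLastPAux_cons (ch : Char) (tl : List Char) (st p : Int) (j : Nat) :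
    pvLastPAux (ch :: tl) st p (j+1) = pvLastPAux tl (st+1) (if ch = '|' then st else p) j := by
  induction j with
  | zero => simp [pvLastPAux]
  | succ j ih =>
    show (if (ch :: tl)[j+1]? = some '|' then st + ((j+1 : Nat) : Int) else pvLastPAux (ch :: tl) st p (j+1))
       = (if tl[j]? = some '|' then (st+1) + (j : Int) else pvLastPAux tl (st+1) (if ch = '|' then st else p) j)
    rw [List.getElem?_cons_succ, ih]
    split <;> [push_cast; skip] <;> ring_nf

lemma pvSbAux_cons (ch : Char) (tl : List Char) (t : Int) (j : Nat) :
    pvSbAux (ch :: tl) t (j+1) = pvSbAux tl (if ch = '|' then 0 else if ch = '*' then t + 1 else t) j := by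
  induction j with
  | zero => simp [pvSbAux]
  | succ j ih =>
    show (if (ch :: tl)[j+1]? = some '|' then 0 else if (ch :: tl)[j+1]? = some '*' then pvSbAux (ch :: tl) t (j+1) + 1 else pvSbAux (ch :: tl) t (j+1))
       = _
    rw [List.getElem?_cons_succ, ih]
    rfl

lemma enumerate_cons {α : Type} (ch : α) (tl : List α) (st : Int) :
    PySem.List.enumerate (ch :: tl) st = (st, ch) :: PySem.List.enumerate tl (st+1) := by
  simp [PySem.List.enumerate]

lemma cons_map_range (n : Nat) (g : Nat → Int) :
    [g 0] ++ (List.range n).map (fun i => g (i+1)) = (List.range (n+1)).map g := by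
  rw [List.range_succ_eq_map, List.map_cons, List.map_map]
  rfl

-- B's first loop builds the running star counts
lemma preFold (cs : List Char) (acc : List Int) (c : Int) :
    cs.foldl (fun (st : List Int × Int) ch =>
      let c' := if ch = '*' then st.2 + 1 else st.2
      (st.1 ++ [c'], c')) (acc, c)
    = (acc ++ (List.range cs.length).map (fun i => c + ((cs.take (i+1)).count '*' : Int)),
       c + (cs.count '*' : Int)) := by
  induction cs generalizing acc c with
  | nil => simp
  | cons ch tl ih =>
    simp only [List.foldl_cons]
    rw [ih]
    have hc : (if ch = '*' then c + 1 else c) = c + (List.count '*' [ch] : Int) := by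
      by_cases h : ch = '*' <;> simp [h]
    have hcnt : ∀ l : List Char, ((ch :: l).count '*' : Int) = (List.count '*' [ch] : Int) + (l.count '*' : Int) := by
      intro l
      rw [show (ch :: l) = [ch] ++ l by rfl, List.count_append]
      push_cast; ring
    refine Prod.ext ?_ ?_
    · show _ ++ [_] ++ _ = _ ++ _
      rw [List.append_assoc]
      congr 1
      rw [List.length_cons,
        ← cons_map_range tl.length (fun i => c + ((List.take (i+1) (ch :: tl)).count '*' : Int))]
      congr 1
      · by_cases h : ch = '*' <;> simp [h]
      · apply List.map_congr_left
        intro j _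
        rw [List.take_succ_cons, hcnt, hc]
        ring
    · show (if ch = '*' then c + 1 else c) + _ = _
      rw [hc, hcnt tl]; ring

-- B's second loop builds the last-pipe-so-far values
lemma prvFold (cs : List Char) (st : Int) (acc : List Int) (p : Int) :
    (PySem.List.enumerate cs st).foldl (fun (a : List Int × Int) ic =>
      let p' := if ic.2 = '|' then ic.1 else a.2
      (a.1 ++ [p'], p')) (acc, p)
    = (acc ++ (List.range cs.length).map (fun i => pvLastPAux cs st p (i+1)),
       pvLastPAux cs st p cs.length) := by
  induction cs generalizing st acc p with
  | nil => simp [PySem.List.enumerate, pvLastPAux]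
  | cons ch tl ih =>
    rw [enumerate_cons]
    simp only [List.foldl_cons]
    rw [ih]
    refine Prod.ext ?_ ?_
    · show _ ++ [_] ++ _ = _ ++ _
      rw [List.append_assoc]
      congr 1
      rw [List.length_cons,
        ← cons_map_range tl.length (fun i => pvLastPAux (ch :: tl) st p (i+1))]
      congr 1
      · rw [pvLastPAux_cons]
        rfl
      · apply List.map_congr_left
        intro j _
        rw [pvLastPAux_cons ch tl st p (j+1)]
    · show pvLastPAux tl (st+1) (if ch = '|' then st else p) tl.length = pvLastPAux (ch :: tl) st p (tl.length + 1)
      rw [pvLastPAux_cons]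

-- B's third loop builds the stars-since-last-pipe values of the reversed string
lemma sbFold (ds : List Char) (acc : List Int) (t : Int) :
    ds.foldl (fun (a : List Int × Int) ch =>
      let t' := if ch = '|' then 0 else if ch = '*' then a.2 + 1 else a.2
      (a.1 ++ [t'], t')) (acc, t)
    = (acc ++ (List.range ds.length).map (fun i => pvSbAux ds t (i+1)),
       pvSbAux ds t ds.length) := by
  induction ds generalizing acc t with
  | nil => simp [pvSbAux]
  | cons ch tl ih =>
    simp only [List.foldl_cons]
    rw [ih]
    refine Prod.ext ?_ ?_
    · show _ ++ [_] ++ _ = _ ++ _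
      rw [List.append_assoc]
      congr 1
      rw [List.length_cons,
        ← cons_map_range tl.length (fun i => pvSbAux (ch :: tl) t (i+1))]
      congr 1
      · rw [pvSbAux_cons]
        rfl
      · apply List.map_congr_left
        intro j _
        rw [pvSbAux_cons ch tl t (j+1)]
    · show pvSbAux tl (if ch = '|' then 0 else if ch = '*' then t + 1 else t) tl.length = pvSbAux (ch :: tl) t (tl.length + 1)
      rw [pvSbAux_cons]

lemma pvSbAux_reverse (cs : List Char) (m : Nat) (hm : m ≤ cs.length) :
    pvSbAux cs.reverse 0 m = pvSbs (cs.drop (cs.length - m)) := by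
  induction m with
  | zero => simp [pvSbAux, pvSbs]
  | succ m ih =>
    have hrev : cs.reverse[m]? = cs[cs.length - 1 - m]? := by
      rw [List.getElem?_reverse (by omega)]
    have hidx : cs.length - 1 - m < cs.length := by omega
    have hdrop : cs.drop (cs.length - (m+1)) = cs[cs.length - 1 - m] :: cs.drop (cs.length - m) := by
      have e1 : cs.length - (m+1) = cs.length - 1 - m := by omega
      have e2 : cs.length - 1 - m + 1 = cs.length - m := by omega
      rw [e1, List.drop_eq_getElem_cons hidx, e2]
    have hget : cs[cs.length - 1 - m]? = some cs[cs.length - 1 - m] := List.getElem?_eq_getElem hidx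
    show (if cs.reverse[m]? = some '|' then 0 else if cs.reverse[m]? = some '*' then pvSbAux cs.reverse 0 m + 1 else pvSbAux cs.reverse 0 m) = _
    rw [hrev, hget, ih (by omega), hdrop]
    unfold pvSbs
    rw [List.takeWhile_cons]
    by_cases h1 : cs[cs.length - 1 - m] = '|'
    · simp [h1]
    · by_cases h2 : cs[cs.length - 1 - m] = '*'
      · simp [h1, h2, List.count_cons]
      · simp [h1, h2, List.count_cons]

lemma single_prefix_iff (l : List Char) (i : Nat) (c : Char) :
    [c] <+: l.drop i ↔ l[i]? = some c := by
  constructor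
  · intro ⟨t, ht⟩
    have : (l.drop i)[0]? = some c := by rw [← ht]; rfl
    rwa [List.getElem?_drop, Nat.add_zero] at this
  · intro h
    have h0 : (l.drop i)[0]? = some c := by rwa [List.getElem?_drop, Nat.add_zero]
    rcases hd : l.drop i with _ | ⟨a, t⟩
    · rw [hd] at h0; simp at h0
    · rw [hd] at h0
      simp at h0
      exact ⟨t, by rw [← h0, List.singleton_append]⟩

lemma single_isPrefixOf (l : List Char) (i : Nat) (c : Char) :
    [c].isPrefixOf (l.drop i) = (l[i]? == some c) := by
  rw [Bool.eq_iff_iff, List.isPrefixOf_iff_prefix, beq_iff_eq]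
  exact single_prefix_iff l i c

-- rfind of a single character is B's last-occurrence scan
lemma rfind_go_pipe (l : List Char) (j : Nat) :
    PySem.Chars.rfind.go l ['|'] j = pvLastP l (j+1) := by
  induction j with
  | zero =>
    show (if ['|'].isPrefixOf l then (0:Int) else -1) = _
    rw [pvLastP_succ]
    have := single_isPrefixOf l 0 '|'
    rw [List.drop_zero] at this
    rw [this]
    by_cases h : l[0]? = some '|' <;> simp [h, pvLastP, pvLastPAux]
  | succ j ih =>
    show (if ['|'].isPrefixOf (l.drop (j+1)) then ((j+1 : Nat) : Int) else PySem.Chars.rfind.go l ['|'] j) = _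
    rw [single_isPrefixOf, ih, pvLastP_succ (k := j+1)]
    by_cases h : l[j+1]? = some '|' <;> simp [h]

lemma rfind_pipe (l : List Char) : PySem.Chars.rfind l ['|'] = pvLastP l l.length := by
  show PySem.Chars.rfind.go l ['|'] l.length = _
  rw [rfind_go_pipe, pvLastP_succ]
  simp

-- count of a single character is List.count
lemma count_go_single (c : Char) (l : List Char) (fuel : Nat) (acc : Nat)
    (hf : l.length ≤ fuel) :
    PySem.Chars.count.go [c] fuel l acc = acc + l.count c := by
  induction l generalizing fuel acc with
  | nil =>
    cases fuel <;> simp [PySem.Chars.count.go]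
  | cons h t ih =>
    cases fuel with
    | zero => simp at hf
    | succ fuel =>
      show (if [c].isPrefixOf (h :: t) then PySem.Chars.count.go [c] fuel (List.drop [c].length (h :: t)) (acc+1) else PySem.Chars.count.go [c] fuel t acc) = _
      have hp : [c].isPrefixOf (h :: t) = (c == h) := by
        simp [List.isPrefixOf]
      rw [hp]
      simp only [List.length_singleton, List.drop_succ_cons, List.drop_zero]
      by_cases hc : c = h
      · rw [if_pos (by simp [hc]), ih fuel (acc+1) (by simpa using hf)]
        rw [List.count_cons]
        simp [hc]
        omega
      · rw [if_neg (by simpa using hc), ih fuel acc (by simpa using hf)]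
        have hne : h ≠ c := Ne.symm hc
        simp [List.count_cons, hne]

lemma count_single (l : List Char) (c : Char) :
    PySem.Chars.count l [c] = l.count c := by
  show (if [c].isEmpty then l.length + 1 else PySem.Chars.count.go [c] l.length l 0) = _
  rw [if_neg (by simp), count_go_single c l l.length 0 le_rfl]
  omega

-- counting stars on a middle slice via prefix counts
lemma stars_take_drop (cs : List Char) (a b : Nat) (hab : a ≤ b) (hb : b ≤ cs.length) :
    (((cs.drop a).take (b - a)).count '*' : Int) = pvStars cs b - pvStars cs a := by
  have h : cs.take b = cs.take a ++ (cs.drop a).take (b - a) := by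
    rw [← List.take_add, Nat.add_sub_cancel' hab]
  unfold pvStars
  rw [h, List.count_append]
  push_cast
  ring

lemma stars_take_drop' (cs : List Char) (a j : Nat) (h : a + j ≤ cs.length) :
    (((cs.drop a).take j).count '*' : Int) = pvStars cs (a + j) - pvStars cs a := by
  have hb := stars_take_drop cs a (a + j) (by omega) h
  rwa [show a + j - a = j from by omega] at hb


-- the three table lookups of B compute the three spec functions
lemma getD_pre (cs : List Char) (k : Nat) (hk : k ≤ cs.length) :
    PySem.List.pyGetD
      ((cs.foldl (fun (st : List Int × Int) ch =>
        let c := if ch = '*' then st.2 + 1 else st.2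
        (st.1 ++ [c], c)) ([0], 0)).1) (k : Int) 0 = pvStars cs k := by
  rw [preFold]
  have heq : ([(0:Int)] ++ (List.range cs.length).map (fun i => 0 + ((cs.take (i+1)).count '*' : Int)))
      = (List.range (cs.length+1)).map (fun i => pvStars cs i) := by
    rw [show ([(0:Int)] : List Int) = [pvStars cs 0] from by simp [pvStars],
      List.map_congr_left (l := List.range cs.length)
        (g := fun i => pvStars cs (i+1)) (fun i _ => by simp [pvStars]),
      cons_map_range]
  show PySem.List.pyGetD ([(0:Int)] ++ _) _ _ = _
  rw [heq, PySem.List.pyGetD_natCast, PySem.List.getD_map_range _ _ _ _ (by omega)]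

lemma getD_prv (cs : List Char) (k : Nat) (hk : k ≤ cs.length) :
    PySem.List.pyGetD
      (((PySem.List.enumerate cs).foldl (fun (st : List Int × Int) ic =>
        let p := if ic.2 = '|' then ic.1 else st.2
        (st.1 ++ [p], p)) ([-1], -1)).1) (k : Int) 0 = pvLastP cs k := by
  rw [prvFold]
  have heq : ([(-1:Int)] ++ (List.range cs.length).map (fun i => pvLastPAux cs 0 (-1) (i+1)))
      = (List.range (cs.length+1)).map (fun i => pvLastP cs i) := by
    rw [← cons_map_range]
    rfl
  show PySem.List.pyGetD ([(-1:Int)] ++ _) _ _ = _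
  rw [heq, PySem.List.pyGetD_natCast, PySem.List.getD_map_range _ _ _ _ (by omega)]

lemma getD_sb (cs : List Char) (k : Nat) (hk : k ≤ cs.length) :
    PySem.List.pyGetD
      (((cs.reverse.foldl (fun (st : List Int × Int) ch =>
        let t := if ch = '|' then 0 else if ch = '*' then st.2 + 1 else st.2
        (st.1 ++ [t], t)) ([0], 0)).1).reverse) (k : Int) 0 = pvSbs (cs.drop k) := by
  rw [sbFold]
  have heq : ([(0:Int)] ++ (List.range cs.reverse.length).map (fun i => pvSbAux cs.reverse 0 (i+1)))
      = (List.range (cs.length+1)).map (fun i => pvSbAux cs.reverse 0 i) := by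
    rw [← cons_map_range]
    simp [pvSbAux]
  show PySem.List.pyGetD (([(0:Int)] ++ _).reverse) _ _ = _
  rw [heq, PySem.List.pyGetD_natCast]
  rw [List.getD_eq_getElem _ _ (by simp only [List.length_reverse, List.length_map, List.length_range]; omega)]
  rw [List.getElem_reverse, List.getElem_map, List.getElem_range]
  simp only [List.length_map, List.length_range]
  rw [show cs.length + 1 - 1 - k = cs.length - k from by omega]
  rw [pvSbAux_reverse cs (cs.length - k) (Nat.sub_le _ _),
    show cs.length - (cs.length - k) = k from by omega]

lemma single_infix_iff (l : List Char) (c : Char) : [c] <:+: l ↔ c ∈ l := by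
  constructor
  · intro h
    exact h.subset (by simp)
  · intro h
    obtain ⟨i, hi⟩ := List.mem_iff_getElem?.mp h
    exact ((single_prefix_iff l i c).mpr hi).isInfix.trans (List.drop_suffix i l).isInfix

lemma stars_succ_pipe (cs : List Char) (k : Nat) (h : cs[k]? = some '|') :
    pvStars cs (k+1) = pvStars cs k := by
  unfold pvStars
  rw [List.take_succ, h]
  simp [List.count_append]

lemma takeWhile_eq_take_pipe (l : List Char) (j : Nat) (hj : l[j]? = some '|')
    (hmin : ∀ i < j, l[i]? ≠ some '|') :
    l.takeWhile (fun c => c != '|') = l.take j := by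
  induction j generalizing l with
  | zero =>
    cases l with
    | nil => simp at hj
    | cons a t =>
      simp at hj
      subst hj
      simp [List.takeWhile_cons]
  | succ j ih =>
    cases l with
    | nil => simp at hj
    | cons a t =>
      have ha : a ≠ '|' := by
        intro h
        exact hmin 0 (by omega) (by simp [h])
      rw [List.takeWhile_cons, if_pos (by simp [ha]), List.take_succ_cons]
      congr 1
      exact ih t (by simpa using hj) (fun i hi => by
        have := hmin (i+1) (by omega)
        simpa using this)

-- the last-pipe scan of the window, in terms of the last-pipe scan of the whole string
lemma pvLastP_shift (cs : List Char) (lo hi : Nat) (hhi : hi ≤ cs.length)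
    (m : Nat) (hm : m ≤ hi - lo) :
    pvLastP ((cs.drop lo).take (hi - lo)) m
      = if (lo : Int) ≤ pvLastP cs (lo + m) then pvLastP cs (lo + m) - lo else -1 := by
  induction m with
  | zero =>
    rw [Nat.add_zero, if_neg (by have := pvLastP_lt cs lo; omega)]
    simp [pvLastP, pvLastPAux]
  | succ m ih =>
    have hget : ((cs.drop lo).take (hi - lo))[m]? = cs[lo + m]? := by
      rw [List.getElem?_take, if_pos (by omega), List.getElem?_drop]
    rw [pvLastP_succ, hget, show lo + (m+1) = (lo + m) + 1 by omega, pvLastP_succ]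
    by_cases hp : cs[lo + m]? = some '|'
    · rw [if_pos hp, if_pos hp, if_pos (by push_cast; omega)]
      push_cast; ring
    · rw [if_neg hp, if_neg hp, ih (by omega)]

-- the per-query equality: A's scan of the segment equals B's table formula
lemma query_eq (cs : List Char) (lo hi : Nat) (hlo : lo ≤ cs.length) (hhi : hi ≤ cs.length) :
    (if PySem.Chars.find ((cs.drop lo).take (hi - lo)) ['|'] ≠ -1 ∧
        PySem.Chars.rfind ((cs.drop lo).take (hi - lo)) ['|'] ≠ -1 then
       ((PySem.Chars.count (PySem.List.slice ((cs.drop lo).take (hi - lo))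
           (some (PySem.Chars.find ((cs.drop lo).take (hi - lo)) ['|'] + 1))
           (some (PySem.Chars.rfind ((cs.drop lo).take (hi - lo)) ['|']))) ['*'] : Nat) : Int)
     else 0)
    = (if pvLastP cs hi ≥ (lo : Int) then
         pvStars cs (pvLastP cs hi).toNat - pvStars cs lo - pvSbs (cs.drop lo)
       else 0) := by
  set seg := (cs.drop lo).take (hi - lo) with hsegdef
  set f := PySem.Chars.find seg ['|'] with hfdef
  set r := PySem.Chars.rfind seg ['|'] with hrdef
  have hlen : seg.length = hi - lo := by
    rw [hsegdef, List.length_take, List.length_drop]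
    omega
  have hget : ∀ j, j < hi - lo → seg[j]? = cs[lo + j]? := by
    intro j hj
    rw [hsegdef, List.getElem?_take, if_pos hj, List.getElem?_drop]
  by_cases hp : '|' ∈ seg
  · -- a pipe occurs in the queried window
    have hinf : ['|'] <:+: seg := (single_infix_iff seg '|').mpr hp
    have hf0 : 0 ≤ f := (PySem.Chars.find_nonneg_iff seg ['|']).mpr hinf
    obtain ⟨hpre, hmin⟩ := PySem.Chars.find_spec (s := seg) (sub := ['|']) hf0
    set j0 := f.toNat with hj0
    have hj0get : seg[j0]? = some '|' := (single_prefix_iff seg j0 '|').mp hpre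
    have hj0min : ∀ i < j0, seg[i]? ≠ some '|' := by
      intro i hi hcontra
      exact hmin i hi ((single_prefix_iff seg i '|').mpr hcontra)
    have hj0lt : j0 < hi - lo := by
      obtain ⟨h1, -⟩ := List.getElem?_eq_some_iff.mp hj0get
      omega
    have hcs0 : cs[lo + j0]? = some '|' := by rw [← hget j0 hj0lt]; exact hj0get
    have hlohi : lo + j0 < hi := by omega
    set l := pvLastP cs hi with hl
    have hlge : (lo : Int) + (j0 : Int) ≤ l := by
      have := pvLastP_max cs hi (lo + j0) hlohi hcs0
      push_cast at this ⊢
      omega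
    have hl0 : 0 ≤ l := by omega
    have hllt : l < (hi : Int) := pvLastP_lt cs hi
    have hr : r = l - lo := by
      have := pvLastP_shift cs lo hi hhi (hi - lo) le_rfl
      rw [show lo + (hi - lo) = hi by omega] at this
      rw [show r = pvLastP seg seg.length from rfind_pipe seg, hlen, this,
        if_pos (by omega)]
    have hcond : f ≠ -1 ∧ r ≠ -1 := by
      constructor
      · omega
      · rw [hr]; omega
    have hbr : pvLastP cs hi ≥ (lo : Int) := by omega
    rw [if_pos hcond, if_pos hbr]
    -- both sides are star counts between the first and last pipe
    have hrval : (0:Int) ≤ r := by rw [hr]; omega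
    have hltn : l.toNat = lo + r.toNat := by omega
    have hltn_le : l.toNat ≤ cs.length := by omega
    have hsbs : pvSbs (cs.drop lo) = pvStars cs (lo + j0) - pvStars cs lo := by
      have htw : (cs.drop lo).takeWhile (fun c => c != '|') = (cs.drop lo).take j0 := by
        apply takeWhile_eq_take_pipe
        · rw [List.getElem?_drop]; exact hcs0
        · intro i hi
          rw [List.getElem?_drop, ← hget i (by omega)]
          exact hj0min i hi
      unfold pvSbs
      rw [htw, stars_take_drop' cs lo j0 (by omega)]
    rw [hsbs]
    have hslice : PySem.List.slice seg (some (f + 1)) (some r)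
        = (seg.drop (j0 + 1)).take (r.toNat - (j0 + 1)) := by
      rw [PySem.List.slice_toNat seg (a := f + 1) (b := r) (by omega) hrval,
        show (f + 1).toNat = j0 + 1 from by omega]
    rw [hslice, count_single]
    by_cases hcase : j0 + 1 ≤ r.toNat
    · -- first and last pipe are distinct: a real middle slice
      have hdt : (seg.drop (j0 + 1)).take (r.toNat - (j0 + 1))
          = (cs.drop (lo + (j0 + 1))).take (l.toNat - (lo + (j0 + 1))) := by
        rw [hsegdef, List.drop_take, List.drop_drop, List.take_take]
        congr 1
        omega
      rw [hdt, show lo + (j0 + 1) = (lo + j0) + 1 by omega]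
      rw [stars_take_drop cs ((lo + j0) + 1) l.toNat (by omega) hltn_le]
      rw [stars_succ_pipe cs (lo + j0) hcs0]
      ring
    · -- first and last pipe coincide: empty middle
      have hrj : r.toNat = j0 := by
        have hge : (j0 : Int) ≤ r := by
          rw [hr]; omega
        omega
      have hz : r.toNat - (j0 + 1) = 0 := by omega
      rw [hz]
      simp only [List.take_zero, List.count_nil]
      have hlj : l.toNat = lo + j0 := by omega
      rw [hlj]
      push_cast
      ring
  · -- no pipe in the window: both sides are 0
    have hfneg : f = -1 := by
      apply (PySem.Chars.find_eq_neg_one_iff seg ['|']).mpr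
      intro hinf
      exact hp ((single_infix_iff seg '|').mp hinf)
    have hbneg : ¬ ((lo : Int) ≤ pvLastP cs hi) := by
      intro hge
      have h0 : 0 ≤ pvLastP cs hi := le_trans (by positivity) hge
      have hpipe := pvLastP_pipe cs hi h0
      have hlt := pvLastP_lt cs hi
      set k := (pvLastP cs hi).toNat with hk
      apply hp
      apply List.mem_iff_getElem?.mpr
      refine ⟨k - lo, ?_⟩
      rw [hget (k - lo) (by omega), show lo + (k - lo) = k by omega]
      exact hpipe
    rw [if_neg (by simp [hfneg]), if_neg (by simpa using hbneg)]

-- A's per-query value, expressed through the spec functions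
lemma pvQA_eq (s : String) (se : Int × Int) :
    pvQA s se =
      (if pvLastP s.toList (PySem.List.clampIdx s.toList.length se.2)
            ≥ ((PySem.List.clampIdx s.toList.length (se.1 - 1) : Nat) : Int) then
         pvStars s.toList (pvLastP s.toList (PySem.List.clampIdx s.toList.length se.2)).toNat
           - pvStars s.toList (PySem.List.clampIdx s.toList.length (se.1 - 1))
           - pvSbs (s.toList.drop (PySem.List.clampIdx s.toList.length (se.1 - 1)))
       else 0) := by
  set cs := s.toList with hcsdef
  set lo := PySem.List.clampIdx cs.length (se.1 - 1) with hlodef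
  set hi := PySem.List.clampIdx cs.length se.2 with hhidef
  have hseg : (PySem.Str.slice s (some (se.1 - 1)) (some se.2)).toList
      = (cs.drop lo).take (hi - lo) := by
    rw [PySem.Str.toList_slice]
    simp only [PySem.Chars.slice_eq_listSlice]
    rw [hlodef, hhidef, hcsdef]
    simp [PySem.List.slice]
  have hq := query_eq cs lo hi (PySem.List.clampIdx_le _ _) (PySem.List.clampIdx_le _ _)
  rw [← hq]
  simp only [pvQA, PySem.Str.find_eq, PySem.Str.rfind_eq, PySem.Str.count_eq,
    PySem.Str.toList_slice, PySem.Chars.slice_eq_listSlice, hseg,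
    show "|".toList = ['|'] from rfl, show "*".toList = ['*'] from rfl]

lemma pv_main (s : String) (si ei : List Int) :
    get_bees_between_flowers s si ei = get_bees_between_flowers_alt s si ei := by
  unfold get_bees_between_flowers get_bees_between_flowers_alt
  have hbody : (fun (result : List Int) (se : Int × Int) =>
      let segment := PySem.Str.slice s (some (se.1 - 1)) (some se.2)
      let first_flower_position := PySem.Str.find segment "|"
      let last_flower_position := PySem.Str.rfind segment "|"
      if first_flower_position ≠ -1 ∧ last_flower_position ≠ -1 then
        result ++ [((PySem.Str.count (PySem.Str.slice segment (some (first_flower_position + 1)) (some last_flower_position)) "*" : Nat) : Int)]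
      else
        result ++ [0])
      = (fun result se => result ++ [pvQA s se]) := by
    funext result se
    simp only [pvQA]
    split <;> rfl
  rw [hbody, PySem.List.foldl_append_singleton_eq_map]
  simp only [List.nil_append]
  apply List.map_congr_left
  intro se _
  rw [pvQA_eq]
  set cs := s.toList with hcs
  set n := cs.length with hn
  set lo := PySem.List.clampIdx n (se.1 - 1) with hlo
  set hi := PySem.List.clampIdx n se.2 with hhi
  have hlon : lo ≤ n := PySem.List.clampIdx_le _ _
  have hhin : hi ≤ n := PySem.List.clampIdx_le _ _
  rw [getD_prv cs hi hhin]
  by_cases hc : pvLastP cs hi ≥ (lo : Int)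
  · rw [if_pos hc, if_pos hc]
    have h0 : 0 ≤ pvLastP cs hi := le_trans (by positivity) hc
    have hlt : pvLastP cs hi < (hi : Int) := pvLastP_lt cs hi
    rw [show pvLastP cs hi = (((pvLastP cs hi).toNat : Nat) : Int) by omega]
    rw [getD_pre cs (pvLastP cs hi).toNat (by omega), getD_pre cs lo hlon, getD_sb cs lo hlon]
    rw [Int.toNat_natCast]
  · rw [if_neg hc, if_neg hc]

-- ===== VERDICT (by name: the statement is the Claim_ definition above) =====
theorem get_bees_between_flowers_spec : Claim_equal_get_bees_between_flowers := by
  intro s si ei _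
  unfold Spec_get_bees_between_flowers
  exact pv_main s si ei
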